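-- pv_equiv track=rewrite | github.com/itsbudyn/advent-of-code | 2024/21/21.1.py | getMovement
-- ===== SOURCE A (Python) =====
-- def getMovement(sequence:str, keymap:dict, startpos:tuple, isKp1:bool):
--     keypos = startpos
--     result = ""
--     for btn in sequence:
--         revMoves = False
--         movement = (keypos[0] - keymap[btn][0], keypos[1] - keymap[btn][1])
--         if keymap[" "] == (keypos[0] - movement[0], keypos[1]): revMoves = True
--         newMoves = ""
--         newMoves += "<"*movement[0] if movement[0] > 0 else ">"*abs(movement[0])
--         newMoves += "^"*movement[1] if movement[1] > 0 else "v"*abs(movement[1])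
--         if revMoves: newMoves = newMoves[::-1]
--         newMoves += "A"
--         result += newMoves
--         keypos = (keypos[0] - movement[0], keypos[1] - movement[1])
--     return result
-- ===== SOURCE B (Python) =====
-- def _run(a, b, dec, inc):
--     # walk one grid cell at a time from coordinate a toward b
--     out = ""
--     while a > b:
--         out += dec
--         a -= 1
--     while a < b:
--         out += inc
--         a += 1
--     return out
--
-- def getMovement(sequence: str, keymap: dict, startpos: tuple, isKp1: bool):
--     if not sequence:
--         return ""
--     btn, rest = sequence[0], sequence[1:]
--     x, y = startpos
--     tx, ty = keymap[btn]
--     horiz = _run(x, tx, "<", ">")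
--     vert = _run(y, ty, "^", "v")
--     piece = vert + horiz if keymap[" "] == (tx, y) else horiz + vert
--     return piece + "A" + getMovement(rest, keymap, (tx, ty), isKp1)
-- ===== Notes on version B (the rewrite author's own statement) =====
-- stated objective: alternative
-- what changed: B is recursive on the sequence and generates movement by a stepping walker that emits one arrow per grid cell (no string multiplication) and handles the avoid-gap case by emitting the vertical run before the horizontal run instead of reversing a built string.
import Mathlib
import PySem

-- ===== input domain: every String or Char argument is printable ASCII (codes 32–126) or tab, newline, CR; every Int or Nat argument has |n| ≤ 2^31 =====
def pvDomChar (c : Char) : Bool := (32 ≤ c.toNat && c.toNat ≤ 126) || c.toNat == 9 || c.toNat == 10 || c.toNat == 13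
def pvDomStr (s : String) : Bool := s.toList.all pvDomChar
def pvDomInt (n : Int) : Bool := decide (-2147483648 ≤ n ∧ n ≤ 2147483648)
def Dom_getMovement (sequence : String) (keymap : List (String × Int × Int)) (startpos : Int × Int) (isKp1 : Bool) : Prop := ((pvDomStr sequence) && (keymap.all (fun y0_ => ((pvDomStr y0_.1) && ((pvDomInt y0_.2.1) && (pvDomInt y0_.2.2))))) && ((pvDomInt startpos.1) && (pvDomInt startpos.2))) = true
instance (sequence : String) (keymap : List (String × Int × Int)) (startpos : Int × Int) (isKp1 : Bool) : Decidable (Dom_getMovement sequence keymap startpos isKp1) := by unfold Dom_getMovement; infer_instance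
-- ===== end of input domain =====

-- B replaces A's string-multiplication + string-reversal loop by a recursion on the sequence
-- with a one-cell-at-a-time stepping walker, choosing vertical-first instead of reversing.
-- Strings are ported as List Char, exact on the ASCII domain.

-- ===== PORT A =====

-- dict lookup on the association list: first match (inputs come from a Python dict, keys unique)
def pvLook (keymap : List (String × Int × Int)) (k : String) : Int × Int :=
  ((keymap.find? (fun p => p.1 == k)).map (·.2)).getD (0, 0)

-- the loop of A: state = (keypos, result); one step per button
def pvGoA (keymap : List (String × Int × Int)) : List Char → (Int × Int) → List Char → List Char
  | [], _, result => result
  | btn :: rest, keypos, result =>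
      let kb := pvLook keymap (String.ofList [btn])
      let movement : Int × Int := (keypos.1 - kb.1, keypos.2 - kb.2)
      let revMoves : Bool := decide (pvLook keymap " " = (keypos.1 - movement.1, keypos.2))
      let newMoves : List Char :=
        (if movement.1 > 0 then List.replicate movement.1.toNat '<'
         else List.replicate (-movement.1).toNat '>') ++
        (if movement.2 > 0 then List.replicate movement.2.toNat '^'
         else List.replicate (-movement.2).toNat 'v')
      let newMoves := if revMoves then newMoves.reverse else newMoves
      let newMoves := newMoves ++ ['A']
      pvGoA keymap rest (keypos.1 - movement.1, keypos.2 - movement.2) (result ++ newMoves)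

def getMovement (sequence : String) (keymap : List (String × Int × Int)) (startpos : Int × Int) (isKp1 : Bool) : String :=
  String.ofList (pvGoA keymap sequence.toList startpos [])

-- ===== PORT B =====

-- B's first while loop of _run: emit dec while a > b, decrementing a
def pvRunDown (a b : Int) (dec : Char) : List Char :=
  if a > b then dec :: pvRunDown (a - 1) b dec else []
termination_by (a - b).toNat
decreasing_by omega

-- B's second while loop of _run: emit inc while a < b, incrementing a
def pvRunUp (a b : Int) (inc : Char) : List Char :=
  if a < b then inc :: pvRunUp (a + 1) b inc else []
termination_by (b - a).toNat
decreasing_by omega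

-- _run: the two while loops in sequence (after the first, a = min a b, on which pvRunUp agrees)
def pvRun (a b : Int) (dec inc : Char) : List Char :=
  pvRunDown a b dec ++ pvRunUp (if a > b then b else a) b inc

-- B's recursion on the sequence
def pvGoB (keymap : List (String × Int × Int)) : List Char → (Int × Int) → List Char
  | [], _ => []
  | btn :: rest, pos =>
      let t := pvLook keymap (String.ofList [btn])
      let horiz := pvRun pos.1 t.1 '<' '>'
      let vert := pvRun pos.2 t.2 '^' 'v'
      let piece := if pvLook keymap " " = (t.1, pos.2) then vert ++ horiz else horiz ++ vert
      piece ++ ['A'] ++ pvGoB keymap rest t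

def getMovement_alt (sequence : String) (keymap : List (String × Int × Int)) (startpos : Int × Int) (isKp1 : Bool) : String :=
  String.ofList (pvGoB keymap sequence.toList startpos)

-- ===== PRECONDITION & SPEC =====
-- Pre_ excludes exactly the inputs on which Python A raises KeyError: some pressed button
-- missing from keymap, or (for a nonempty sequence) the " " key missing.
def Pre_getMovement (sequence : String) (keymap : List (String × Int × Int)) (startpos : Int × Int) (isKp1 : Bool) : Prop :=
  (sequence.toList.all (fun c => (keymap.find? (fun p => p.1 == String.ofList [c])).isSome) &&
   (sequence.toList.isEmpty || (keymap.find? (fun p => p.1 == " ")).isSome)) = true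
instance (sequence : String) (keymap : List (String × Int × Int)) (startpos : Int × Int) (isKp1 : Bool) : Decidable (Pre_getMovement sequence keymap startpos isKp1) := by unfold Pre_getMovement; infer_instance

def pvWitness_getMovement : String × (List (String × Int × Int)) × (Int × Int) × Bool :=
  ("1A", [("1", (2, 1)), ("A", (0, 0)), (" ", (1, 0))], (0, 0), true)

def Spec_getMovement (sequence : String) (keymap : List (String × Int × Int)) (startpos : Int × Int) (isKp1 : Bool) (out : String) : Prop := out = getMovement_alt sequence keymap startpos isKp1
instance (sequence : String) (keymap : List (String × Int × Int)) (startpos : Int × Int) (isKp1 : Bool) (out : String) : Decidable (Spec_getMovement sequence keymap startpos isKp1 out) := by unfold Spec_getMovement; infer_instance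

-- ===== CLAIM (what is proved, stated in full; the proofs are below) =====
def Claim_equal_getMovement : Prop := ∀ (sequence : String) (keymap : List (String × Int × Int)) (startpos : Int × Int) (isKp1 : Bool), Dom_getMovement sequence keymap startpos isKp1 → Pre_getMovement sequence keymap startpos isKp1 → Spec_getMovement sequence keymap startpos isKp1 (getMovement sequence keymap startpos isKp1)

-- ===== LEMMAS AND PROOFS =====

theorem pvRunDown_eq (a b : Int) (c : Char) : pvRunDown a b c = List.replicate (a - b).toNat c := by
  generalize h : (a - b).toNat = n
  induction n generalizing a with
  | zero => rw [pvRunDown, if_neg (by omega)]; simp [show (a - b).toNat = 0 by omega]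
  | succ n ih =>
      rw [pvRunDown, if_pos (by omega), ih (a - 1) (by omega)]
      simp [show (a - b).toNat = n + 1 by omega, List.replicate_succ]

theorem pvRunUp_eq (a b : Int) (c : Char) : pvRunUp a b c = List.replicate (b - a).toNat c := by
  generalize h : (b - a).toNat = n
  induction n generalizing a with
  | zero => rw [pvRunUp, if_neg (by omega)]; simp [show (b - a).toNat = 0 by omega]
  | succ n ih =>
      rw [pvRunUp, if_pos (by omega), ih (a + 1) (by omega)]
      simp [show (b - a).toNat = n + 1 by omega, List.replicate_succ]

-- pvRun is exactly A's two-branch replicated string in both sign cases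
theorem pvRun_eq (a b : Int) (dec inc : Char) :
    pvRun a b dec inc =
      (if a - b > 0 then List.replicate (a - b).toNat dec
       else List.replicate (-(a - b)).toNat inc) := by
  unfold pvRun
  rw [pvRunDown_eq, pvRunUp_eq]
  split_ifs with h1 h2
  · simp
  · omega
  · omega
  · rw [show (a - b).toNat = 0 by omega, show (b - a).toNat = (-(a - b)).toNat by omega]
    simp

-- A's loop produces exactly B's recursion from the same position
theorem pvGoA_eq (keymap : List (String × Int × Int)) (l : List Char) (keypos : Int × Int)
    (acc : List Char) :
    pvGoA keymap l keypos acc = acc ++ pvGoB keymap l keypos := by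
  induction l generalizing keypos acc with
  | nil => simp [pvGoA, pvGoB]
  | cons b rest ih =>
      set kb := pvLook keymap (String.ofList [b]) with hkb
      have h1 : keypos.1 - (keypos.1 - kb.1) = kb.1 := by ring
      have h2 : keypos.2 - (keypos.2 - kb.2) = kb.2 := by ring
      show pvGoA keymap (b :: rest) keypos acc = _
      rw [pvGoA]
      simp only [← hkb, h1, h2]
      rw [ih]
      show acc ++ _ ++ _ = acc ++ pvGoB keymap (b :: rest) keypos
      rw [pvGoB]
      simp only [← hkb, ← List.append_assoc]
      congr 2
      rw [pvRun_eq, pvRun_eq]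
      by_cases hg : pvLook keymap " " = (kb.1, keypos.2)
      · rw [if_pos (decide_eq_true hg), if_pos hg, List.reverse_append]
        split_ifs <;> simp [List.reverse_replicate]
      · rw [if_neg (by simp [hg]), if_neg hg]

theorem getMovement_spec : Claim_equal_getMovement := by
  intro sequence keymap startpos isKp1 _ _
  show getMovement sequence keymap startpos isKp1 = getMovement_alt sequence keymap startpos isKp1
  unfold getMovement getMovement_alt
  rw [pvGoA_eq]
  simp
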